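-- pv_equiv track=rewrite | github.com/codeprofile/Project-Kisan | app/google_adk_integration/farmbot_service.py | _determine_response_type
-- ===== SOURCE A (Python) =====
-- def _determine_response_type(agent_used: str, tools_called: list) -> str:
--     """Determine response type for voice optimization"""
--     if not tools_called:
--         return "general"
--
--     tool_names = [tool.lower() for tool in tools_called]
--
--     if any("crop" in tool or "health" in tool or "disease" in tool for tool in tool_names):
--         return "crop_health"
--     elif any("weather" in tool or "forecast" in tool for tool in tool_names):
--         return "weather"
--     elif any("market" in tool or "price" in tool for tool in tool_names):
--         return "market"
--     elif any("scheme" in tool or "government" in tool for tool in tool_names):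
--         return "schemes"
--     else:
--         return "general"
-- ===== SOURCE B (Python) =====
-- _KEYWORD_RANK = [
--     ("crop", 0), ("health", 0), ("disease", 0),
--     ("weather", 1), ("forecast", 1),
--     ("market", 2), ("price", 2),
--     ("scheme", 3), ("government", 3),
-- ]
-- _TYPES = ["crop_health", "weather", "market", "schemes", "general"]
--
--
-- def _determine_response_type(agent_used: str, tools_called: list) -> str:
--     """Single pass: keep the minimum priority rank of any keyword seen."""
--     best = 4
--     for tool in tools_called:
--         t = tool.lower()
--         for kw, r in _KEYWORD_RANK:
--             if kw in t and r < best: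
--                 best = r
--     return _TYPES[best]
-- ===== Notes on version B (the rewrite author's own statement) =====
-- stated objective: alternative
-- what changed: Instead of four staged any(...) scans chosen by an if/elif chain, B makes a single pass over the tools keeping the minimum priority rank of any keyword found, and indexes a type table with that minimum; the empty-list guard disappears because the minimum stays at the 'general' rank.
import Mathlib
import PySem

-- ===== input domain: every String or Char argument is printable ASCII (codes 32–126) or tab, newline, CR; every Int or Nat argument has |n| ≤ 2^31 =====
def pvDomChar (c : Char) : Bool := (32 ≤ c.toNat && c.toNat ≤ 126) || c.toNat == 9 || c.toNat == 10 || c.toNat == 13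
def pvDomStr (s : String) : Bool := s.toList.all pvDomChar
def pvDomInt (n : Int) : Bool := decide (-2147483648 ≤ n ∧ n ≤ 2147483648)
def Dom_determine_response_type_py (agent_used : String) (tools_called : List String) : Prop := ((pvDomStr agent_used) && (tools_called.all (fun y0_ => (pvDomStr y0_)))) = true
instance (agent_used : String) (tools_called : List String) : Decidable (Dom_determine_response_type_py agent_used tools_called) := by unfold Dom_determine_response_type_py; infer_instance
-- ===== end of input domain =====

-- B replaces A's four staged any(...) scans and if/elif chain with ONE pass keeping the minimum keyword priority rank, then indexes a type table (alternative decomposition, same cost).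


-- ===== PORT A =====
def determine_response_type_py (agent_used : String) (tools_called : List String) : String :=
  if tools_called = [] then "general"
  else
    let tool_names := tools_called.map PySem.Str.lower
    if tool_names.any (fun tool => PySem.Str.isIn "crop" tool || PySem.Str.isIn "health" tool || PySem.Str.isIn "disease" tool) then "crop_health"
    else if tool_names.any (fun tool => PySem.Str.isIn "weather" tool || PySem.Str.isIn "forecast" tool) then "weather"
    else if tool_names.any (fun tool => PySem.Str.isIn "market" tool || PySem.Str.isIn "price" tool) then "market"
    else if tool_names.any (fun tool => PySem.Str.isIn "scheme" tool || PySem.Str.isIn "government" tool) then "schemes"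
    else "general"

-- ===== PORT B =====
def pvKeywordRank : List (String × Nat) :=
  [("crop", 0), ("health", 0), ("disease", 0),
   ("weather", 1), ("forecast", 1),
   ("market", 2), ("price", 2),
   ("scheme", 3), ("government", 3)]

def pvTypes : List String := ["crop_health", "weather", "market", "schemes", "general"]

-- the inner `for kw, r in _KEYWORD_RANK` loop of Source B
def pvStep (best : Nat) (t : String) : Nat :=
  pvKeywordRank.foldl (fun b p => if PySem.Str.isIn p.1 t && decide (p.2 < b) then p.2 else b) best

def determine_response_type_py_alt (agent_used : String) (tools_called : List String) : String :=
  let best := tools_called.foldl (fun b tool => pvStep b (PySem.Str.lower tool)) 4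
  pvTypes.getD best ""   -- _TYPES[best]: best ≤ 4 always, so the Python index never raises

-- ===== PRECONDITION & SPEC =====
def Spec_determine_response_type_py (agent_used : String) (tools_called : List String) (out : String) : Prop := out = determine_response_type_py_alt agent_used tools_called
instance (agent_used : String) (tools_called : List String) (out : String) : Decidable (Spec_determine_response_type_py agent_used tools_called out) := by unfold Spec_determine_response_type_py; infer_instance

-- ===== CLAIM (what is proved, stated in full; the proofs are below) =====
def Claim_equal_determine_response_type_py : Prop := ∀ (agent_used : String) (tools_called : List String), Dom_determine_response_type_py agent_used tools_called → Spec_determine_response_type_py agent_used tools_called (determine_response_type_py agent_used tools_called)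

-- ===== LEMMAS AND PROOFS =====

-- priority rank of a single (lowercased) tool name
def pvRank1 (t : String) : Nat :=
  if PySem.Str.isIn "crop" t || PySem.Str.isIn "health" t || PySem.Str.isIn "disease" t then 0
  else if PySem.Str.isIn "weather" t || PySem.Str.isIn "forecast" t then 1
  else if PySem.Str.isIn "market" t || PySem.Str.isIn "price" t then 2
  else if PySem.Str.isIn "scheme" t || PySem.Str.isIn "government" t then 3
  else 4

def pvLRank (ls : List String) : Nat := ls.foldr (fun t a => min (pvRank1 t) a) 4

-- A's four group predicates (exactly the lambdas of port A)
def pvG0 : String → Bool := fun tool => PySem.Str.isIn "crop" tool || PySem.Str.isIn "health" tool || PySem.Str.isIn "disease" tool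
def pvG1 : String → Bool := fun tool => PySem.Str.isIn "weather" tool || PySem.Str.isIn "forecast" tool
def pvG2 : String → Bool := fun tool => PySem.Str.isIn "market" tool || PySem.Str.isIn "price" tool
def pvG3 : String → Bool := fun tool => PySem.Str.isIn "scheme" tool || PySem.Str.isIn "government" tool

-- right-fold form of the inner keyword loop: each step is `if match then min rank acc else acc`
def pvG (t : String) (p : String × Nat) (a : Nat) : Nat :=
  if PySem.Str.isIn p.1 t then min p.2 a else a

theorem pvG_min (t : String) (ps : List (String × Nat)) (b x : Nat) :
    ps.foldr (pvG t) (min x b) = min x (ps.foldr (pvG t) b) := by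
  induction ps with
  | nil => rfl
  | cons q ps ih =>
    simp only [List.foldr, ih, pvG]
    split_ifs <;> omega

theorem pvFoldPairs (t : String) (ps : List (String × Nat)) (b : Nat) :
    ps.foldl (fun b p => if PySem.Str.isIn p.1 t && decide (p.2 < b) then p.2 else b) b
      = ps.foldr (pvG t) b := by
  induction ps generalizing b with
  | nil => rfl
  | cons p ps ih =>
    simp only [List.foldl_cons, List.foldr, ih]
    have hf : (if PySem.Str.isIn p.1 t && decide (p.2 < b) then p.2 else b)
        = pvG t p b := by
      unfold pvG; split_ifs <;> simp_all <;> omega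
    rw [hf]
    unfold pvG
    split_ifs with h
    · exact pvG_min t ps b p.2
    · rfl

-- single-tool rank facts
theorem pvRank1_le0 (t : String) (h : pvG0 t = true) : pvRank1 t ≤ 0 := by
  unfold pvG0 at h; unfold pvRank1; rw [if_pos h]
theorem pvRank1_le1 (t : String) (h : pvG1 t = true) : pvRank1 t ≤ 1 := by
  unfold pvG1 at h; unfold pvRank1; split_ifs <;> simp_all
theorem pvRank1_le2 (t : String) (h : pvG2 t = true) : pvRank1 t ≤ 2 := by
  unfold pvG2 at h; unfold pvRank1; split_ifs <;> simp_all
theorem pvRank1_le3 (t : String) (h : pvG3 t = true) : pvRank1 t ≤ 3 := by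
  unfold pvG3 at h; unfold pvRank1; split_ifs <;> simp_all
theorem pvRank1_ge1 (t : String) (h0 : pvG0 t = false) : 1 ≤ pvRank1 t := by
  unfold pvG0 at h0; unfold pvRank1; rw [if_neg (by rw [h0]; simp)]; split_ifs <;> omega
theorem pvRank1_ge2 (t : String) (h0 : pvG0 t = false) (h1 : pvG1 t = false) : 2 ≤ pvRank1 t := by
  unfold pvG0 at h0; unfold pvG1 at h1; unfold pvRank1
  rw [if_neg (by rw [h0]; simp), if_neg (by rw [h1]; simp)]; split_ifs <;> omega
theorem pvRank1_ge3 (t : String) (h0 : pvG0 t = false) (h1 : pvG1 t = false) (h2 : pvG2 t = false) : 3 ≤ pvRank1 t := by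
  unfold pvG0 at h0; unfold pvG1 at h1; unfold pvG2 at h2; unfold pvRank1
  rw [if_neg (by rw [h0]; simp), if_neg (by rw [h1]; simp), if_neg (by rw [h2]; simp)]; split_ifs <;> omega
theorem pvRank1_ge4 (t : String) (h0 : pvG0 t = false) (h1 : pvG1 t = false) (h2 : pvG2 t = false) (h3 : pvG3 t = false) : 4 ≤ pvRank1 t := by
  unfold pvG0 at h0; unfold pvG1 at h1; unfold pvG2 at h2; unfold pvG3 at h3; unfold pvRank1
  rw [if_neg (by rw [h0]; simp), if_neg (by rw [h1]; simp), if_neg (by rw [h2]; simp), if_neg (by rw [h3]; simp)]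

-- upper bounds: some group matches somewhere
theorem pvUB (ls : List String) (g : String → Bool) (k : Nat)
    (hel : ∀ t, g t = true → pvRank1 t ≤ k) (h : ls.any g = true) : pvLRank ls ≤ k := by
  induction ls with
  | nil => simp at h
  | cons t r ih =>
    simp only [List.any_cons, Bool.or_eq_true] at h
    simp only [pvLRank, List.foldr] at *
    rcases h with h | h
    · have := hel t h; omega
    · have := ih h; omega

-- lower bounds: no earlier group matches anywhere
theorem pvLB (ls : List String) (gs : List (String → Bool)) (k : Nat)
    (hel : ∀ t, (∀ g ∈ gs, g t = false) → k ≤ pvRank1 t)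
    (h : ∀ g ∈ gs, ls.any g = false) (hk : k ≤ 4) : k ≤ pvLRank ls := by
  induction ls with
  | nil => simpa [pvLRank] using hk
  | cons t r ih =>
    simp only [pvLRank, List.foldr] at *
    have ht : ∀ g ∈ gs, g t = false := by
      intro g hg
      have := h g hg
      simp only [List.any_cons, Bool.or_eq_false_iff] at this
      exact this.1
    have hr : ∀ g ∈ gs, r.any g = false := by
      intro g hg
      have := h g hg
      simp only [List.any_cons, Bool.or_eq_false_iff] at this
      exact this.2
    have := hel t ht
    have := ih hr
    omega

theorem pvLRank_le (ls : List String) : pvLRank ls ≤ 4 := by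
  induction ls with
  | nil => simp [pvLRank]
  | cons t r ih => simp only [pvLRank, List.foldr] at *; omega

theorem pvStep_eq (b : Nat) (t : String) (hb : b ≤ 4) : pvStep b t = min b (pvRank1 t) := by
  unfold pvStep
  rw [pvFoldPairs]
  unfold pvKeywordRank
  simp only [List.foldr]
  have g3 : pvG t ("scheme", 3) (pvG t ("government", 3) b)
      = if pvG3 t then min 3 b else b := by
    unfold pvG pvG3
    cases h1 : PySem.Str.isIn "scheme" t <;> cases h2 : PySem.Str.isIn "government" t <;>
      simp only [h1, h2] <;> simp
  rw [g3]
  have g2 : ∀ x, pvG t ("market", 2) (pvG t ("price", 2) x)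
      = if pvG2 t then min 2 x else x := by
    intro x; unfold pvG pvG2
    cases h1 : PySem.Str.isIn "market" t <;> cases h2 : PySem.Str.isIn "price" t <;>
      simp only [h1, h2] <;> simp
  rw [g2]
  have g1 : ∀ x, pvG t ("weather", 1) (pvG t ("forecast", 1) x)
      = if pvG1 t then min 1 x else x := by
    intro x; unfold pvG pvG1
    cases h1 : PySem.Str.isIn "weather" t <;> cases h2 : PySem.Str.isIn "forecast" t <;>
      simp only [h1, h2] <;> simp
  rw [g1]
  have g0 : ∀ x, pvG t ("crop", 0) (pvG t ("health", 0) (pvG t ("disease", 0) x))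
      = if pvG0 t then min 0 x else x := by
    intro x; unfold pvG pvG0
    cases h1 : PySem.Str.isIn "crop" t <;> cases h2 : PySem.Str.isIn "health" t <;>
      cases h3 : PySem.Str.isIn "disease" t <;> simp only [h1, h2, h3] <;> simp
  rw [g0]
  unfold pvRank1 pvG0 pvG1 pvG2 pvG3
  split_ifs <;> omega

theorem pvStep_le (b : Nat) (t : String) (hb : b ≤ 4) : pvStep b t ≤ 4 := by
  rw [pvStep_eq b t hb]; omega

theorem pvFold_eq (ls : List String) (b : Nat) (hb : b ≤ 4) :
    ls.foldl pvStep b = min b (pvLRank ls) := by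
  induction ls generalizing b with
  | nil => simp only [List.foldl_nil, pvLRank, List.foldr]; omega
  | cons t r ih =>
    simp only [List.foldl_cons, pvLRank, List.foldr] at *
    rw [ih (pvStep b t) (pvStep_le b t hb), pvStep_eq b t hb]
    omega

-- ===== VERDICT (by name: the statement is the Claim_ definition above) =====
theorem determine_response_type_py_spec : Claim_equal_determine_response_type_py := by
  intro agent_used tools_called _
  unfold Spec_determine_response_type_py determine_response_type_py determine_response_type_py_alt
  have h1 : tools_called.foldl (fun b tool => pvStep b (PySem.Str.lower tool)) 4
      = (tools_called.map PySem.Str.lower).foldl pvStep 4 := by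
    rw [List.foldl_map]
  rw [h1, pvFold_eq _ 4 (by omega)]
  have hle := pvLRank_le (tools_called.map PySem.Str.lower)
  have h3 : min 4 (pvLRank (tools_called.map PySem.Str.lower)) = pvLRank (tools_called.map PySem.Str.lower) := by omega
  rw [h3]
  by_cases hnil : tools_called = []
  · subst hnil; simp [pvLRank, pvTypes]
  · rw [if_neg hnil]
    simp only []
    split_ifs with c0 c1 c2 c3
    · have hub : pvLRank (tools_called.map PySem.Str.lower) ≤ 0 :=
        pvUB _ pvG0 0 pvRank1_le0 c0
      rw [show pvLRank (tools_called.map PySem.Str.lower) = 0 by omega]; rfl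
    · simp only [Bool.not_eq_true] at c0
      have hub : pvLRank (tools_called.map PySem.Str.lower) ≤ 1 :=
        pvUB _ pvG1 1 pvRank1_le1 c1
      have hlb : 1 ≤ pvLRank (tools_called.map PySem.Str.lower) :=
        pvLB _ [pvG0] 1 (fun t ht => pvRank1_ge1 t (ht pvG0 (by simp)))
          (by intro g hg; simp at hg; subst hg; exact c0) (by omega)
      rw [show pvLRank (tools_called.map PySem.Str.lower) = 1 by omega]; rfl
    · simp only [Bool.not_eq_true] at c0 c1
      have hub : pvLRank (tools_called.map PySem.Str.lower) ≤ 2 :=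
        pvUB _ pvG2 2 pvRank1_le2 c2
      have hlb : 2 ≤ pvLRank (tools_called.map PySem.Str.lower) :=
        pvLB _ [pvG0, pvG1] 2
          (fun t ht => pvRank1_ge2 t (ht pvG0 (by simp)) (ht pvG1 (by simp)))
          (by intro g hg; simp at hg; rcases hg with h | h <;> subst h <;> assumption) (by omega)
      rw [show pvLRank (tools_called.map PySem.Str.lower) = 2 by omega]; rfl
    · simp only [Bool.not_eq_true] at c0 c1 c2
      have hub : pvLRank (tools_called.map PySem.Str.lower) ≤ 3 :=
        pvUB _ pvG3 3 pvRank1_le3 c3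
      have hlb : 3 ≤ pvLRank (tools_called.map PySem.Str.lower) :=
        pvLB _ [pvG0, pvG1, pvG2] 3
          (fun t ht => pvRank1_ge3 t (ht pvG0 (by simp)) (ht pvG1 (by simp)) (ht pvG2 (by simp)))
          (by intro g hg; simp at hg; rcases hg with h | h | h <;> subst h <;> assumption) (by omega)
      rw [show pvLRank (tools_called.map PySem.Str.lower) = 3 by omega]; rfl
    · simp only [Bool.not_eq_true] at c0 c1 c2 c3
      have hlb : 4 ≤ pvLRank (tools_called.map PySem.Str.lower) :=
        pvLB _ [pvG0, pvG1, pvG2, pvG3] 4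
          (fun t ht => pvRank1_ge4 t (ht pvG0 (by simp)) (ht pvG1 (by simp)) (ht pvG2 (by simp)) (ht pvG3 (by simp)))
          (by intro g hg; simp at hg; rcases hg with h | h | h | h <;> subst h <;> assumption) (by omega)
      rw [show pvLRank (tools_called.map PySem.Str.lower) = 4 by omega]; rfl
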